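-- pv_equiv track=rewrite | github.com/DataGoal/StudyMaterials | python/PyEx.py | frndFollower
-- ===== SOURCE A (Python) =====
-- def frndFollower(friends):
--     d = {}
--     for i in friends:
--         if i[0] not in d:
--             if len(i) > 1:
--                 d[i[0]] = 1
--             else:
--                 d[i[0]] = 0
--         else:
--             d[i[0]] += 1
--     return d
-- ===== SOURCE B (Python) =====
-- def frndFollower(friends):
--     groups = {}
--     for i in friends:
--         groups.setdefault(i[0], []).append(i)
--     return {k: len(g) - 1 + (1 if len(g[0]) > 1 else 0) for k, g in groups.items()}
-- ===== Notes on version B (the rewrite author's own statement) =====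
-- stated objective: alternative
-- what changed: B replaces A's per-element conditional dict updates by a group-then-summarize shape: one pass building key -> list of entries, then a comprehension computing len(group) - 1 + (first entry has length > 1).
import Mathlib
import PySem

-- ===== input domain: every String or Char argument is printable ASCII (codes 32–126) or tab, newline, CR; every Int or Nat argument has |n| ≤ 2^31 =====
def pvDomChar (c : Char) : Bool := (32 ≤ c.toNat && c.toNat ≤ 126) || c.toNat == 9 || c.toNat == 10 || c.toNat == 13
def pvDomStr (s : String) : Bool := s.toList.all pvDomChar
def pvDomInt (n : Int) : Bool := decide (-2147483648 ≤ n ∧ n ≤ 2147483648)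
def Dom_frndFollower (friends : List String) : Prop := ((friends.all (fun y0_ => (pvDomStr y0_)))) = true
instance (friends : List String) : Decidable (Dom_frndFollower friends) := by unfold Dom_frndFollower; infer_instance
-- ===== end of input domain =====

-- B replaces A's per-element conditional dict updates by a group-then-summarize pass (same cost, different shape).

-- ===== PORT A =====
-- one loop step of A: branch on membership of i[0], store 0/1 or increment
def frndFollowerStepA (d : PySem.Dict String Int) (i : String) : PySem.Dict String Int :=
  match i.toList with
  | [] => d            -- Python raises IndexError here; excluded by Pre_
  | c :: _ =>
    let k := String.ofList [c]
    if d.contains k = false then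
      if i.toList.length > 1 then d.insert k 1 else d.insert k 0
    else d.insert k (d.getD k 0 + 1)

def frndFollower (friends : List String) : List (String × Int) :=
  (friends.foldl frndFollowerStepA PySem.Dict.empty).items

-- ===== PORT B =====
-- one loop step of B's first pass: groups.setdefault(i[0], []).append(i)
def frndFollowerStepB (g : PySem.Dict String (List String)) (i : String) :
    PySem.Dict String (List String) :=
  match i.toList with
  | [] => g            -- Python raises IndexError here; excluded by Pre_
  | c :: _ => g.modify (String.ofList [c]) [] (fun l => l ++ [i])

-- the summarizing comprehension: k ↦ len(g) - 1 + (1 if len(g[0]) > 1 else 0)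
def frndFollowerVal (p : String × List String) : String × Int :=
  (p.1, (p.2.length : Int) - 1 + (if (p.2.headD "").toList.length > 1 then 1 else 0))

def frndFollower_alt (friends : List String) : List (String × Int) :=
  ((friends.foldl frndFollowerStepB PySem.Dict.empty).items).map frndFollowerVal

-- ===== PRECONDITION & SPEC =====
-- Pre_ excludes lists containing an empty string, on which A raises IndexError at i[0].
def Pre_frndFollower (friends : List String) : Prop := ∀ s ∈ friends, s.toList ≠ []
instance (friends : List String) : Decidable (Pre_frndFollower friends) := by
  unfold Pre_frndFollower; infer_instance
def pvWitness_frndFollower : List String := ["ab", "a", "b", "ax"]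

def Spec_frndFollower (friends : List String) (out : List (String × Int)) : Prop := out = frndFollower_alt friends
instance (friends : List String) (out : List (String × Int)) : Decidable (Spec_frndFollower friends out) := by unfold Spec_frndFollower; infer_instance

-- ===== CLAIM (what is proved, stated in full; the proofs are below) =====
def Claim_equal_frndFollower : Prop := ∀ (friends : List String), Dom_frndFollower friends → Pre_frndFollower friends → Spec_frndFollower friends (frndFollower friends)

-- ===== LEMMAS AND PROOFS =====

lemma contains_rel (d : PySem.Dict String Int) (g : PySem.Dict String (List String))
    (hR : d.items = g.items.map frndFollowerVal) (k : String) :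
    d.contains k = g.contains k := by
  simp only [PySem.Dict.contains, hR, List.any_map]
  rfl

lemma keys_rel (d : PySem.Dict String Int) (g : PySem.Dict String (List String))
    (hR : d.items = g.items.map frndFollowerVal) :
    d.keys = g.keys := by
  simp only [PySem.Dict.keys, hR, List.map_map]
  rfl

lemma val_append (l : List String) (i : String) (hl : l ≠ []) :
    frndFollowerVal (k, l ++ [i]) = (k, (frndFollowerVal (k, l)).2 + 1) := by
  obtain ⟨a, t, rfl⟩ := List.exists_cons_of_ne_nil hl
  simp [frndFollowerVal]
  ring

lemma fold_rel (l : List String) (hl : ∀ s ∈ l, s.toList ≠ []) :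
    ∀ (d : PySem.Dict String Int) (g : PySem.Dict String (List String)),
    g.keys.Nodup → (∀ p ∈ g.items, p.2 ≠ []) → d.items = g.items.map frndFollowerVal →
    (l.foldl frndFollowerStepA d).items
      = ((l.foldl frndFollowerStepB g).items).map frndFollowerVal := by
  induction l with
  | nil => intro d g _ _ hR; simpa using hR
  | cons i l ih =>
    intro d g hnd hne hR
    have hi : i.toList ≠ [] := hl i (by simp)
    obtain ⟨c, rest, hct⟩ := List.exists_cons_of_ne_nil hi
    have hl' : ∀ s ∈ l, s.toList ≠ [] := fun s hs => hl s (by simp [hs])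
    set k := String.ofList [c] with hk
    have hcont : d.contains k = g.contains k := contains_rel d g hR k
    simp only [List.foldl_cons]
    by_cases hc : g.contains k = true
    · -- key already present: A increments, B appends to the group
      have hgk : ∃ lk, (k, lk) ∈ g.items ∧ lk ≠ [] := by
        simp only [PySem.Dict.contains, List.any_eq_true] at hc
        obtain ⟨⟨p1, p2⟩, hp, hpk⟩ := hc
        have he : p1 = k := beq_iff_eq.1 hpk
        exact ⟨p2, by rw [← he]; exact hp, hne _ hp⟩
      obtain ⟨lk, hlk, hlkne⟩ := hgk
      have hgetg : g.getD k [] = lk := PySem.Dict.getD_of_mem_items g hlk hnd []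
      have hdnd : d.keys.Nodup := by rw [keys_rel d g hR]; exact hnd
      have hgetd : d.getD k 0 = (frndFollowerVal (k, lk)).2 := by
        apply PySem.Dict.getD_of_mem_items d (v := (frndFollowerVal (k, lk)).2) _ hdnd
        rw [hR]
        have := List.mem_map_of_mem (f := frndFollowerVal) hlk
        simpa [frndFollowerVal] using this
      have hstepA : frndFollowerStepA d i = d.insert k (d.getD k 0 + 1) := by
        simp [frndFollowerStepA, hct, ← hk, hcont, hc]
      have hstepB : frndFollowerStepB g i = g.insert k (lk ++ [i]) := by
        simp [frndFollowerStepB, hct, ← hk, PySem.Dict.modify, hgetg]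
      rw [hstepA, hstepB]
      apply ih hl'
      · exact PySem.Dict.nodup_keys_insert _ _ _ hnd
      · intro p hp
        rcases (PySem.Dict.mem_items_insert _ _ _ _).1 hp with h | ⟨h, _⟩
        · subst h; simp
        · exact hne p h
      · have hdc : d.contains k = true := by rw [hcont]; exact hc
        rw [PySem.Dict.items_insert_of_contains _ _ hdc,
            PySem.Dict.items_insert_of_contains _ _ hc, hR, List.map_map, List.map_map]
        apply List.map_congr_left
        rintro ⟨p1, p2⟩ hp
        by_cases hpk : p1 = k
        · have hp2 : p2 = lk := by
            have hmem : (k, p2) ∈ g.items := by rw [← hpk]; exact hp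
            have h2 := PySem.Dict.getD_of_mem_items g hmem hnd []
            rw [hgetg] at h2; exact h2.symm
          subst hp2
          have hb : ((frndFollowerVal (k, p2)).1 == k) = true := by
            simp [frndFollowerVal]
          simp only [Function.comp_apply, hb, hpk, beq_self_eq_true, if_true]
          rw [hgetd, val_append p2 i hlkne]
        · have hb : (p1 == k) = false := beq_eq_false_iff_ne.2 hpk
          have hb2 : ((frndFollowerVal (p1, p2)).1 == k) = false := hb
          simp [Function.comp, hb, hb2]
    · -- new key: A stores the 0/1 flag, B starts the group [i]
      have hstepA : frndFollowerStepA d i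
          = d.insert k (if i.toList.length > 1 then 1 else 0) := by
        simp only [frndFollowerStepA, hct, ← hk]
        rw [hcont]
        simp only [Bool.not_eq_true] at hc
        simp only [hc, if_true]
        split <;> rfl
      have hstepB : frndFollowerStepB g i = g.insert k [i] := by
        have : g.getD k [] = [] :=
          PySem.Dict.getD_of_not_contains g [] (by simpa using hc)
        simp [frndFollowerStepB, hct, ← hk, PySem.Dict.modify, this]
      rw [hstepA, hstepB]
      apply ih hl'
      · exact PySem.Dict.nodup_keys_insert _ _ _ hnd
      · intro p hp
        rcases (PySem.Dict.mem_items_insert _ _ _ _).1 hp with h | ⟨h, _⟩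
        · subst h; simp
        · exact hne p h
      · have hdc : d.contains k = false := by rw [hcont]; simpa using hc
        rw [PySem.Dict.items_insert_of_not_contains _ _ hdc,
            PySem.Dict.items_insert_of_not_contains _ _ (by simpa using hc),
            hR, List.map_append]
        simp [frndFollowerVal]

-- ===== VERDICT (by name: the statement is the Claim_ definition above) =====
theorem frndFollower_spec : Claim_equal_frndFollower := by
  intro friends _ hpre
  unfold Spec_frndFollower frndFollower frndFollower_alt
  exact fold_rel friends hpre PySem.Dict.empty PySem.Dict.empty
    (by simp [PySem.Dict.keys, PySem.Dict.empty]) (by simp [PySem.Dict.empty]) (by simp [PySem.Dict.empty])
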